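-- pv_equiv track=rewrite | github.com/castilhos90124/Data_IAPS | parte2.py | Filtrar_Variaveis_INTs
-- ===== SOURCE A (Python) =====
-- def Filtrar_Variaveis_INTs(variaveis,tabelas):
--     variaveis_INTs =[]
--     for k in variaveis:
--         VariavelInvalida = False
--         for i in tabelas:
--             if any(s == k for s in i[0]):
--                 index = i[0].index(k)
--                 for j in i[1][index]:
--                     if not j.isdigit():
--                         VariavelInvalida = True
--         if not VariavelInvalida:
--             variaveis_INTs.append(k)
--     return variaveis_INTs
-- ===== SOURCE B (Python) =====
-- def Filtrar_Variaveis_INTs(variaveis, tabelas):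
--     vars_set = set(variaveis)
--     invalid = set()
--     for cols, vals in tabelas:
--         for name in set(cols):
--             if name in vars_set and not all(v.isdigit() for v in vals[cols.index(name)]):
--                 invalid.add(name)
--     return [k for k in variaveis if k not in invalid]
-- ===== Notes on version B (the rewrite author's own statement) =====
-- stated objective: faster
-- what changed: Replaces A's per-variable rescan of every table by a single table-major pass that builds a set of invalid variable names (one membership/index lookup per distinct column), followed by one filtering pass over variaveis.
import Mathlib
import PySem

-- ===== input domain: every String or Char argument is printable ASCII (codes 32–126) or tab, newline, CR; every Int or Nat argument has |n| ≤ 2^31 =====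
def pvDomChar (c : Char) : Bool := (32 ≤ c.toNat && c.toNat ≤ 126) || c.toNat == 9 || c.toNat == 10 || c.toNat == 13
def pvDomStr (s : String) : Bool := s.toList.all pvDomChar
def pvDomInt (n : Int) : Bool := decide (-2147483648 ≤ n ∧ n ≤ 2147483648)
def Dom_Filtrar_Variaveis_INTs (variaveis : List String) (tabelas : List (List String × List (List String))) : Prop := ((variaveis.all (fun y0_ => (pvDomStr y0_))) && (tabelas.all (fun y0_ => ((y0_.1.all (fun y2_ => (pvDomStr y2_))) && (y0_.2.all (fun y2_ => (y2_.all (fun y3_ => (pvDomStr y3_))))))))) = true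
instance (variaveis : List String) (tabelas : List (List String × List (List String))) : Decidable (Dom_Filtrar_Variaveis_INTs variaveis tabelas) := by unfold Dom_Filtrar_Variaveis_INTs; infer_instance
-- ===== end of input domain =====

-- B replaces A's per-variable rescan of every table by one table-major pass that
-- builds a set of invalid variable names, then filters variaveis once (objective: faster).

-- ===== PORT A =====
def Filtrar_Variaveis_INTs (variaveis : List String) (tabelas : List (List String × List (List String))) : List String :=
  variaveis.foldl (fun acc k =>
    let inval := tabelas.foldl (fun inv i =>
      if i.1.any (fun s => s == k) then
        let index := (PySem.List.index? i.1 k).getD 0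
        (PySem.List.pyGetD i.2 (index : Int) []).foldl
          (fun v j => if !(PySem.Str.strIsdigit j) then true else v) inv
      else inv) false
    if !inval then acc ++ [k] else acc) []

-- ===== PORT B =====
def Filtrar_Variaveis_INTs_alt (variaveis : List String) (tabelas : List (List String × List (List String))) : List String :=
  let varsSet : PySem.Set String := PySem.Set.ofList variaveis
  let invalid : PySem.Set String := tabelas.foldl (fun inv t =>
    (PySem.Set.ofList t.1).foldl (fun inv name =>
      if varsSet.contains name &&
         !((PySem.List.pyGetD t.2 (((PySem.List.index? t.1 name).getD 0 : Nat) : Int) []).all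
             (fun v => PySem.Str.strIsdigit v)) then
        PySem.Set.add inv name
      else inv) inv) PySem.Set.empty
  variaveis.filter (fun k => !(invalid.contains k))

-- ===== PRECONDITION & SPEC =====
-- Pre_ excludes exactly the inputs where Python A raises IndexError: a variable whose
-- first-occurrence column index in some table exceeds that table's list of value rows.
def Pre_Filtrar_Variaveis_INTs (variaveis : List String) (tabelas : List (List String × List (List String))) : Prop :=
  ∀ t ∈ tabelas, ∀ k ∈ variaveis, k ∈ t.1 → (PySem.List.index? t.1 k).getD 0 < t.2.length
instance (variaveis : List String) (tabelas : List (List String × List (List String))) : Decidable (Pre_Filtrar_Variaveis_INTs variaveis tabelas) := by unfold Pre_Filtrar_Variaveis_INTs; infer_instance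
def pvWitness_Filtrar_Variaveis_INTs : List String × (List (List String × List (List String))) :=
  (["a", "b"], [(["a"], [["12", "3"]])])

def Spec_Filtrar_Variaveis_INTs (variaveis : List String) (tabelas : List (List String × List (List String))) (out : List String) : Prop := out = Filtrar_Variaveis_INTs_alt variaveis tabelas
instance (variaveis : List String) (tabelas : List (List String × List (List String))) (out : List String) : Decidable (Spec_Filtrar_Variaveis_INTs variaveis tabelas out) := by unfold Spec_Filtrar_Variaveis_INTs; infer_instance

-- ===== CLAIM (what is proved, stated in full; the proofs are below) =====
def Claim_equal_Filtrar_Variaveis_INTs : Prop := ∀ (variaveis : List String) (tabelas : List (List String × List (List String))), Dom_Filtrar_Variaveis_INTs variaveis tabelas → Pre_Filtrar_Variaveis_INTs variaveis tabelas → Spec_Filtrar_Variaveis_INTs variaveis tabelas (Filtrar_Variaveis_INTs variaveis tabelas)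

-- ===== LEMMAS AND PROOFS =====

-- whether table t makes variable k invalid (the value both inner computations decide)
def pvBad (k : String) (t : List String × List (List String)) : Bool :=
  t.1.any (fun s => s == k) &&
  (PySem.List.pyGetD t.2 (((PySem.List.index? t.1 k).getD 0 : Nat) : Int) []).any
    (fun j => !(PySem.Str.strIsdigit j))

theorem pvRowFold (row : List String) (b : Bool) :
    row.foldl (fun v j => if !(PySem.Str.strIsdigit j) then true else v) b
      = (b || row.any (fun j => !(PySem.Str.strIsdigit j))) := by
  induction row generalizing b with
  | nil => simp
  | cons x xs ih =>
    simp only [List.foldl_cons, List.any_cons, ih]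
    cases PySem.Str.strIsdigit x <;> simp

theorem pvAFlag (tabelas : List (List String × List (List String))) (k : String) (b : Bool) :
    tabelas.foldl (fun inv i =>
      if i.1.any (fun s => s == k) then
        (PySem.List.pyGetD i.2 (((PySem.List.index? i.1 k).getD 0 : Nat) : Int) []).foldl
          (fun v j => if !(PySem.Str.strIsdigit j) then true else v) inv
      else inv) b
    = (b || tabelas.any (pvBad k)) := by
  induction tabelas generalizing b with
  | nil => simp
  | cons t ts ih =>
    simp only [List.foldl_cons, List.any_cons]
    by_cases h : (t.1.any fun s => s == k) = true
    · rw [if_pos h, ih, pvRowFold]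
      have hb : pvBad k t
          = (PySem.List.pyGetD t.2 (((PySem.List.index? t.1 k).getD 0 : Nat) : Int) []).any
              (fun j => !(PySem.Str.strIsdigit j)) := by
        unfold pvBad; rw [h, Bool.true_and]
      rw [hb, Bool.or_assoc]
    · rw [if_neg h, ih]
      have hb : pvBad k t = false := by
        unfold pvBad
        rw [Bool.eq_false_iff.2 h, Bool.false_and]
      rw [hb, Bool.false_or]

theorem pvInnerMem (k : String) (names : List String) (c : String → Bool)
    (inv : PySem.Set String) :
    (k ∈ names.foldl (fun inv name => if c name then PySem.Set.add inv name else inv) inv)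
      ↔ k ∈ inv ∨ (k ∈ names ∧ c k = true) := by
  induction names generalizing inv with
  | nil => simp
  | cons x xs ih =>
    simp only [List.foldl_cons, List.mem_cons, ih]
    by_cases hx : c x = true
    · rw [if_pos hx, PySem.Set.mem_add]
      constructor
      · rintro ((h | rfl) | ⟨h1, h2⟩)
        · exact Or.inl h
        · exact Or.inr ⟨Or.inl rfl, hx⟩
        · exact Or.inr ⟨Or.inr h1, h2⟩
      · rintro (h | ⟨rfl | h1, h2⟩)
        · exact Or.inl (Or.inl h)
        · exact Or.inl (Or.inr rfl)
        · exact Or.inr ⟨h1, h2⟩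
    · rw [if_neg hx]
      constructor
      · rintro (h | ⟨h1, h2⟩)
        · exact Or.inl h
        · exact Or.inr ⟨Or.inr h1, h2⟩
      · rintro (h | ⟨rfl | h1, h2⟩)
        · exact Or.inl h
        · exact absurd h2 hx
        · exact Or.inr ⟨h1, h2⟩

theorem pvOuterMem (k : String) (tabelas : List (List String × List (List String)))
    (c : (List String × List (List String)) → String → Bool) (inv : PySem.Set String) :
    (k ∈ tabelas.foldl (fun inv t =>
        (PySem.Set.ofList t.1).foldl
          (fun inv name => if c t name then PySem.Set.add inv name else inv) inv) inv)
      ↔ k ∈ inv ∨ ∃ t ∈ tabelas, k ∈ t.1 ∧ c t k = true := by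
  induction tabelas generalizing inv with
  | nil => simp
  | cons t ts ih =>
    simp only [List.foldl_cons, ih, pvInnerMem, PySem.Set.mem_ofList]
    constructor
    · rintro ((h | h) | ⟨u, hu, h⟩)
      · exact Or.inl h
      · exact Or.inr ⟨t, by simp, h⟩
      · exact Or.inr ⟨u, by simp [hu], h⟩
    · rintro (h | ⟨u, hu, h⟩)
      · exact Or.inl (Or.inl h)
      · rcases List.mem_cons.1 hu with rfl | hu
        · exact Or.inl (Or.inr h)
        · exact Or.inr ⟨u, hu, h⟩

-- ===== VERDICT (by name: the statement is the Claim_ definition above) =====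
theorem Filtrar_Variaveis_INTs_spec : Claim_equal_Filtrar_Variaveis_INTs := by
  unfold Claim_equal_Filtrar_Variaveis_INTs
  intro variaveis tabelas _ _
  unfold Spec_Filtrar_Variaveis_INTs Filtrar_Variaveis_INTs Filtrar_Variaveis_INTs_alt
  rw [PySem.List.foldl_append_if_eq_filter]
  simp only [List.nil_append]
  apply List.filter_congr
  intro k hk
  rw [pvAFlag]
  simp only [Bool.false_or]
  congr 1
  rw [Bool.eq_iff_iff]
  rw [List.any_eq_true]
  have hc : ∀ (l : List String), l.contains k = true ↔ k ∈ l := by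
    intro l; exact List.contains_iff_mem
  rw [PySem.Set.contains_iff, pvOuterMem]
  simp only [PySem.Set.empty, List.not_mem_nil, false_or]
  constructor
  · rintro ⟨t, ht, hb⟩
    unfold pvBad at hb
    rw [Bool.and_eq_true, List.any_beq', hc] at hb
    refine ⟨t, ht, hb.1, ?_⟩
    rw [Bool.and_eq_true]
    refine ⟨by rw [PySem.Set.contains_iff, PySem.Set.mem_ofList]; exact hk, ?_⟩
    simp only [Bool.not_eq_true', List.all_eq_not_any_not]
    simpa using hb.2
  · rintro ⟨t, ht, hkt, hb⟩
    rw [Bool.and_eq_true] at hb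
    refine ⟨t, ht, ?_⟩
    unfold pvBad
    rw [Bool.and_eq_true, List.any_beq', hc]
    refine ⟨hkt, ?_⟩
    have := hb.2
    simp only [Bool.not_eq_true', List.all_eq_not_any_not] at this
    simpa using this
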